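-- pv_equiv track=rewrite | github.com/pwelty/slate | src/scripts/dashboard_renderer.py | generate_final_css
-- ===== SOURCE A (Python) =====
-- def generate_final_css(css_variables, theme_name='dark'):
--     """Convert collected CSS variables to final CSS"""
--     css_content = ""
--
--     if css_variables:
--         css_content += "/* Widget and Component CSS - Generated from variables */\n"
--
--         # Group variables by type
--         widget_vars = {k: v for k, v in css_variables.items() if k.startswith('widget-')}
--         group_vars = {k: v for k, v in css_variables.items() if k.startswith('group-')}
--         other_vars = {k: v for k, v in css_variables.items() if not k.startswith(('widget-', 'group-'))}
--
--         # Generate widget CSS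
--         if widget_vars:
--             css_content += "\n/* Widget Styles */\n"
--             for widget_type, styles in widget_vars.items():
--                 if isinstance(styles, dict) and 'raw_css' in styles:
--                     css_content += f"/* {widget_type} */\n"
--                     css_content += f"{styles['raw_css']}\n\n"
--
--         # Generate group CSS
--         if group_vars:
--             css_content += "\n/* Group Styles */\n"
--             for group_type, styles in group_vars.items():
--                 if isinstance(styles, dict) and 'raw_css' in styles:
--                     css_content += f"/* {group_type} */\n"
--                     css_content += f"{styles['raw_css']}\n\n"
--
--         # Generate other CSS
--         if other_vars:
--             css_content += "\n/* Other Styles */\n"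
--             for var_name, styles in other_vars.items():
--                 if isinstance(styles, dict) and 'raw_css' in styles:
--                     css_content += f"/* {var_name} */\n"
--                     css_content += f"{styles['raw_css']}\n\n"
--
--     # Wrap CSS in style tags if there's content
--     if css_content.strip():
--         return f'<style>\n{css_content}\n</style>'
--
--     return ""
-- ===== SOURCE B (Python) =====
-- def generate_final_css(css_variables, theme_name='dark'):
--     """Convert collected CSS variables to final CSS (stable-sort-then-scan version)"""
--     if not css_variables:
--         return ""
--
--     def rank(key):
--         if key.startswith('widget-'):
--             return 0
--         if key.startswith('group-'):
--             return 1
--         return 2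
--
--     titles = ('Widget Styles', 'Group Styles', 'Other Styles')
--     css_content = "/* Widget and Component CSS - Generated from variables */\n"
--     prev = -1
--     for key, styles in sorted(css_variables.items(), key=lambda kv: rank(kv[0])):
--         r = rank(key)
--         if r != prev:
--             css_content += f"\n/* {titles[r]} */\n"
--             prev = r
--         if isinstance(styles, dict) and 'raw_css' in styles:
--             css_content += f"/* {key} */\n{styles['raw_css']}\n\n"
--     if css_content.strip():
--         return f'<style>\n{css_content}\n</style>'
--     return ""
-- ===== Notes on version B (the rewrite author's own statement) =====
-- stated objective: alternative
-- what changed: Replaces A's three prefix-filter comprehension scans each followed by its own emit loop by a stable sort of the entries by section rank (widget=0, group=1, other=2) followed by a single linear scan that emits a section header whenever the rank changes; stability makes the within-section order identical to A's.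
import Mathlib
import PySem

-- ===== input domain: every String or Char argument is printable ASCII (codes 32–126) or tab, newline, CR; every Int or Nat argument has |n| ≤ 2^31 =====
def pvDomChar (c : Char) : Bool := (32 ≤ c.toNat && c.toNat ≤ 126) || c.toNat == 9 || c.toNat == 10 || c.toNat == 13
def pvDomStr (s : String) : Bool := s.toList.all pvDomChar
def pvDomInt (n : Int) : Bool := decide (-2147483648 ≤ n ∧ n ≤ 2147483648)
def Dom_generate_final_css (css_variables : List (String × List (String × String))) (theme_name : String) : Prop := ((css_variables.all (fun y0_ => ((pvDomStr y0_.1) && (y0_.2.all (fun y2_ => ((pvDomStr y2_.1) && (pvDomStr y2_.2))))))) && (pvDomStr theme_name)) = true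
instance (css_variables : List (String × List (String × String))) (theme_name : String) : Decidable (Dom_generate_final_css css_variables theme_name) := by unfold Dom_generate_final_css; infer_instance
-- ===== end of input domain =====

-- B replaces A's three prefix-filter scans plus three emit loops by a STABLE SORT of the entries
-- by section rank followed by ONE linear scan that emits a section header whenever the rank
-- changes (objective: alternative algorithm, sort-then-group).

-- ===== PORT A =====
-- literal transliteration of A: three dict comprehensions (filters), then three sequential emit loops
def generate_final_css (css_variables : List (String × List (String × String))) (theme_name : String) : String :=
  let css_content : String := ""
  let css_content :=
    if css_variables.isEmpty then css_content
    else
      let css_content := css_content ++ "/* Widget and Component CSS - Generated from variables */\n"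
      let widget_vars := css_variables.filter (fun p => PySem.Str.startswith p.1 "widget-")
      let group_vars := css_variables.filter (fun p => PySem.Str.startswith p.1 "group-")
      let other_vars := css_variables.filter (fun p => !(PySem.Str.startswith p.1 "widget-" || PySem.Str.startswith p.1 "group-"))
      let css_content :=
        if widget_vars.isEmpty then css_content
        else
          widget_vars.foldl (fun acc p =>
            if (PySem.Dict.mk p.2).contains "raw_css" then
              acc ++ ("/* " ++ p.1 ++ " */\n") ++ ((PySem.Dict.mk p.2).getD "raw_css" "" ++ "\n\n")
            else acc) (css_content ++ "\n/* Widget Styles */\n")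
      let css_content :=
        if group_vars.isEmpty then css_content
        else
          group_vars.foldl (fun acc p =>
            if (PySem.Dict.mk p.2).contains "raw_css" then
              acc ++ ("/* " ++ p.1 ++ " */\n") ++ ((PySem.Dict.mk p.2).getD "raw_css" "" ++ "\n\n")
            else acc) (css_content ++ "\n/* Group Styles */\n")
      let css_content :=
        if other_vars.isEmpty then css_content
        else
          other_vars.foldl (fun acc p =>
            if (PySem.Dict.mk p.2).contains "raw_css" then
              acc ++ ("/* " ++ p.1 ++ " */\n") ++ ((PySem.Dict.mk p.2).getD "raw_css" "" ++ "\n\n")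
            else acc) (css_content ++ "\n/* Other Styles */\n")
      css_content
  if PySem.Str.strip css_content ≠ "" then "<style>\n" ++ css_content ++ "\n</style>"
  else ""

-- ===== PORT B =====
-- rank of a key: which of the three sections it belongs to
def gfcRank (k : String) : Int :=
  if PySem.Str.startswith k "widget-" then 0
  else if PySem.Str.startswith k "group-" then 1
  else 2

-- titles[r]
def gfcTitle (r : Int) : String :=
  if r = 0 then "Widget Styles" else if r = 1 then "Group Styles" else "Other Styles"

-- one iteration of B's scan: state is (css_content, prev)
def gfcStep (st : String × Int) (p : String × List (String × String)) : String × Int :=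
  let r := gfcRank p.1
  let acc := if r ≠ st.2 then st.1 ++ ("\n/* " ++ gfcTitle r ++ " */\n") else st.1
  let prev := if r ≠ st.2 then r else st.2
  let acc :=
    if (PySem.Dict.mk p.2).contains "raw_css" then
      acc ++ ("/* " ++ p.1 ++ " */\n") ++ ((PySem.Dict.mk p.2).getD "raw_css" "" ++ "\n\n")
    else acc
  (acc, prev)

def generate_final_css_alt (css_variables : List (String × List (String × String))) (theme_name : String) : String :=
  if css_variables.isEmpty then ""
  else
    let css_content :=
      ((PySem.List.sorted css_variables (fun kv => gfcRank kv.1)).foldl gfcStep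
        ("/* Widget and Component CSS - Generated from variables */\n", (-1 : Int))).1
    if PySem.Str.strip css_content ≠ "" then "<style>\n" ++ css_content ++ "\n</style>"
    else ""

-- ===== PRECONDITION & SPEC =====
def Spec_generate_final_css (css_variables : List (String × List (String × String))) (theme_name : String) (out : String) : Prop := out = generate_final_css_alt css_variables theme_name
instance (css_variables : List (String × List (String × String))) (theme_name : String) (out : String) : Decidable (Spec_generate_final_css css_variables theme_name out) := by unfold Spec_generate_final_css; infer_instance

-- ===== CLAIM =====
def Claim_equal_generate_final_css : Prop := ∀ (css_variables : List (String × List (String × String))) (theme_name : String), Dom_generate_final_css css_variables theme_name → Spec_generate_final_css css_variables theme_name (generate_final_css css_variables theme_name)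

-- ===== LEMMAS AND PROOFS =====

-- the '/* key */\n{raw_css}\n\n' fragment, when styles has a 'raw_css' entry (proof-side notion)
def gfcFrag (key : String) (styles : List (String × String)) : Option String :=
  if (PySem.Dict.mk styles).contains "raw_css" then
    some ("/* " ++ key ++ " */\n" ++ ((PySem.Dict.mk styles).getD "raw_css" "" ++ "\n\n"))
  else none

theorem join_empty_nil : PySem.Str.join "" ([] : List String) = "" := by
  simp [PySem.Str.join, PySem.Chars.join]; rfl

theorem intercalate_nil_sep (l : List (List Char)) : List.intercalate [] l = l.flatten := by
  induction l with
  | nil => simp [List.intercalate]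
  | cons a t ih =>
    cases t with
    | nil => simp [List.intercalate]
    | cons b u =>
      simp only [List.intercalate, List.intersperse] at *
      simp_all [List.flatten]

theorem join_empty_cons (x : String) (xs : List String) :
    PySem.Str.join "" (x :: xs) = x ++ PySem.Str.join "" xs := by
  simp [PySem.Str.join, PySem.Chars.join, intercalate_nil_sep]

-- a string cannot start with both "widget-" and "group-"
theorem not_widget_and_group (s : String) :
    PySem.Str.startswith s "widget-" = true → PySem.Str.startswith s "group-" = false := by
  intro h
  by_contra hg
  simp only [Bool.not_eq_false] at hg
  simp only [PySem.Str.startswith, PySem.Chars.startswith] at h hg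
  rcases List.isPrefixOf_iff_prefix.mp h with ⟨t1, ht1⟩
  rcases List.isPrefixOf_iff_prefix.mp hg with ⟨t2, ht2⟩
  rw [← ht1] at ht2
  simp at ht2

-- A's emit loop from any start string appends the joined fragments of the kept entries
theorem foldl_section (l : List (String × List (String × String))) (s : String) :
    l.foldl (fun acc p =>
      if (PySem.Dict.mk p.2).contains "raw_css" then
        acc ++ ("/* " ++ p.1 ++ " */\n") ++ ((PySem.Dict.mk p.2).getD "raw_css" "" ++ "\n\n")
      else acc) s
    = s ++ PySem.Str.join "" (l.filterMap (fun p => gfcFrag p.1 p.2)) := by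
  induction l generalizing s with
  | nil => simp [join_empty_nil]
  | cons p t ih =>
    rw [List.foldl_cons, List.filterMap_cons]
    by_cases hc : (PySem.Dict.mk p.2).contains "raw_css" = true
    · rw [if_pos hc, ih]
      simp only [gfcFrag, if_pos hc]
      rw [join_empty_cons]
      simp [String.append_assoc]
    · rw [if_neg (by simp [hc]), ih]
      simp only [gfcFrag, if_neg (by simp [hc] : ¬ ((PySem.Dict.mk p.2).contains "raw_css" = true))]

theorem rank_widget (s : String) (hw : PySem.Str.startswith s "widget-" = true) : gfcRank s = 0 := by
  unfold gfcRank; rw [hw]; simp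

theorem rank_group (s : String) (hw : PySem.Str.startswith s "widget-" = false)
    (hg : PySem.Str.startswith s "group-" = true) : gfcRank s = 1 := by
  unfold gfcRank; rw [hw, hg]; simp

theorem rank_other (s : String) (hw : PySem.Str.startswith s "widget-" = false)
    (hg : PySem.Str.startswith s "group-" = false) : gfcRank s = 2 := by
  unfold gfcRank; rw [hw, hg]; simp

-- insertBy passes over a block of elements it is not 'before'
theorem insertBy_append_left {α : Type} (before : α → α → Bool) (x : α) (as bs : List α)
    (h : ∀ y ∈ as, before x y = false) :
    PySem.List.insertBy before x (as ++ bs) = as ++ PySem.List.insertBy before x bs := by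
  induction as with
  | nil => simp
  | cons a t ih =>
    have ha := h a (by simp)
    simp only [List.cons_append, PySem.List.insertBy, ha, Bool.false_eq_true, if_false]
    rw [ih (fun y hy => h y (by simp [hy]))]

-- inserting an element of rank r into w ++ g ++ o places it at the end of its own block
theorem insertBy_rank (x : String × List (String × String))
    (a0 a1 a2 : List (String × List (String × String)))
    (h0 : ∀ y ∈ a0, gfcRank y.1 = 0) (h1 : ∀ y ∈ a1, gfcRank y.1 = 1)
    (h2 : ∀ y ∈ a2, gfcRank y.1 = 2) :
    PySem.List.insertBy (fun a b => decide (gfcRank a.1 < gfcRank b.1)) x (a0 ++ a1 ++ a2) =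
      if gfcRank x.1 = 0 then (a0 ++ [x]) ++ a1 ++ a2
      else if gfcRank x.1 = 1 then a0 ++ (a1 ++ [x]) ++ a2
      else a0 ++ a1 ++ (a2 ++ [x]) := by
  by_cases hx0 : gfcRank x.1 = 0
  · rw [if_pos hx0, List.append_assoc, insertBy_append_left _ _ a0 (a1 ++ a2)
      (fun y hy => by simp [h0 y hy, hx0])]
    cases h12 : a1 ++ a2 with
    | nil =>
      simp [PySem.List.insertBy, h12]
    | cons b t =>
      have hb : gfcRank b.1 = 1 ∨ gfcRank b.1 = 2 := by
        have : b ∈ a1 ++ a2 := by rw [h12]; simp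
        rcases List.mem_append.mp this with hm | hm
        · exact Or.inl (h1 b hm)
        · exact Or.inr (h2 b hm)
      have hlt : decide (gfcRank x.1 < gfcRank b.1) = true := by
        rcases hb with h | h <;> simp [hx0, h]
      simp [PySem.List.insertBy, hlt, h12, List.append_assoc]
  · by_cases hx1 : gfcRank x.1 = 1
    · rw [if_neg hx0, if_pos hx1]
      have hrw : a0 ++ a1 ++ a2 = (a0 ++ a1) ++ a2 := by simp
      rw [hrw, insertBy_append_left _ _ (a0 ++ a1) a2
        (fun y hy => by
          rcases List.mem_append.mp hy with hm | hm
          · simp [h0 y hm, hx1]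
          · simp [h1 y hm, hx1])]
      cases ha2 : a2 with
      | nil => simp [PySem.List.insertBy]
      | cons b t =>
        have hb : gfcRank b.1 = 2 := h2 b (by rw [ha2]; simp)
        have hlt : decide (gfcRank x.1 < gfcRank b.1) = true := by simp [hx1, hb]
        simp [PySem.List.insertBy, hlt, List.append_assoc]
    · rw [if_neg hx0, if_neg hx1]
      rw [PySem.List.insertBy_of_forall_not_before _ _ _
        (fun y hy => by
          have hx2 : gfcRank x.1 = 2 := by
            unfold gfcRank at *
            split_ifs at * <;> omega
          rcases List.mem_append.mp hy with hy' | hm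
          · rcases List.mem_append.mp hy' with hm | hm
            · simp [h0 y hm, hx2]
            · simp [h1 y hm, hx2]
          · simp [h2 y hm, hx2])]
      simp [List.append_assoc]

-- stable sort by rank = widget filter ++ group filter ++ other filter (A's three scans)
theorem sorted_partition_aux (xs : List (String × List (String × String)))
    (a0 a1 a2 : List (String × List (String × String)))
    (h0 : ∀ y ∈ a0, gfcRank y.1 = 0) (h1 : ∀ y ∈ a1, gfcRank y.1 = 1)
    (h2 : ∀ y ∈ a2, gfcRank y.1 = 2) :
    xs.foldl (fun acc x => PySem.List.insertBy (fun a b => decide (gfcRank a.1 < gfcRank b.1)) x acc) (a0 ++ a1 ++ a2) =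
      (a0 ++ xs.filter (fun p => PySem.Str.startswith p.1 "widget-")) ++
      (a1 ++ xs.filter (fun p => PySem.Str.startswith p.1 "group-")) ++
      (a2 ++ xs.filter (fun p => !(PySem.Str.startswith p.1 "widget-" || PySem.Str.startswith p.1 "group-"))) := by
  induction xs generalizing a0 a1 a2 with
  | nil => simp
  | cons x t ih =>
    rw [List.foldl_cons, insertBy_rank x a0 a1 a2 h0 h1 h2]
    rw [List.filter_cons, List.filter_cons, List.filter_cons]
    by_cases hw : PySem.Str.startswith x.1 "widget-" = true
    · have hg := not_widget_and_group x.1 hw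
      have hr : gfcRank x.1 = 0 := rank_widget x.1 hw
      rw [if_pos hr]
      rw [ih (a0 ++ [x]) a1 a2
        (fun y hy => by rcases List.mem_append.mp hy with hm | hm
                        · exact h0 y hm
                        · simp at hm; subst hm; exact hr) h1 h2]
      rw [hw, hg]
      simp [List.append_assoc]
    · have hw' : PySem.Str.startswith x.1 "widget-" = false := by simpa using hw
      by_cases hg : PySem.Str.startswith x.1 "group-" = true
      · have hr : gfcRank x.1 = 1 := rank_group x.1 hw' hg
        rw [if_neg (by rw [hr]; omega), if_pos hr]
        rw [ih a0 (a1 ++ [x]) a2 h0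
          (fun y hy => by rcases List.mem_append.mp hy with hm | hm
                          · exact h1 y hm
                          · simp at hm; subst hm; exact hr) h2]
        rw [hw', hg]
        simp [List.append_assoc]
      · have hg' : PySem.Str.startswith x.1 "group-" = false := by simpa using hg
        have hr : gfcRank x.1 = 2 := rank_other x.1 hw' hg'
        rw [if_neg (by rw [hr]; omega), if_neg (by rw [hr]; omega)]
        rw [ih a0 a1 (a2 ++ [x]) h0 h1
          (fun y hy => by rcases List.mem_append.mp hy with hm | hm
                          · exact h2 y hm
                          · simp at hm; subst hm; exact hr)]
        rw [hw', hg']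
        simp [List.append_assoc]

theorem sorted_partition (xs : List (String × List (String × String))) :
    PySem.List.sorted xs (fun kv => gfcRank kv.1) =
      xs.filter (fun p => PySem.Str.startswith p.1 "widget-") ++
      xs.filter (fun p => PySem.Str.startswith p.1 "group-") ++
      xs.filter (fun p => !(PySem.Str.startswith p.1 "widget-" || PySem.Str.startswith p.1 "group-")) := by
  rw [PySem.List.sorted_eq_foldl_insertBy]
  have := sorted_partition_aux xs [] [] [] (by simp) (by simp) (by simp)
  simpa using this

-- B's scan over a constant-rank run, prev already = r: only fragments are appended
theorem gfc_scan_run (l : List (String × List (String × String))) (r : Int)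
    (h : ∀ p ∈ l, gfcRank p.1 = r) (s : String) :
    l.foldl gfcStep (s, r) = (s ++ PySem.Str.join "" (l.filterMap (fun p => gfcFrag p.1 p.2)), r) := by
  induction l generalizing s with
  | nil => simp [join_empty_nil]
  | cons p t ih =>
    have hp : gfcRank p.1 = r := h p (by simp)
    rw [List.foldl_cons, List.filterMap_cons]
    have hstep : gfcStep (s, r) p =
        (if (PySem.Dict.mk p.2).contains "raw_css" then
          s ++ ("/* " ++ p.1 ++ " */\n") ++ ((PySem.Dict.mk p.2).getD "raw_css" "" ++ "\n\n")
        else s, r) := by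
      simp [gfcStep, hp]
    rw [hstep]
    by_cases hc : (PySem.Dict.mk p.2).contains "raw_css" = true
    · rw [if_pos hc, ih (fun q hq => h q (by simp [hq]))]
      simp only [gfcFrag, if_pos hc]
      rw [join_empty_cons]
      simp [String.append_assoc]
    · rw [if_neg (by simp [hc]), ih (fun q hq => h q (by simp [hq]))]
      simp only [gfcFrag, if_neg (by simp [hc] : ¬ ((PySem.Dict.mk p.2).contains "raw_css" = true))]

-- B's scan over a constant-rank section from prev ≠ r: header (if nonempty) then fragments
theorem gfc_scan_section (l : List (String × List (String × String))) (r : Int)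
    (h : ∀ p ∈ l, gfcRank p.1 = r) (s : String) (pv : Int) (hpv : pv ≠ r) :
    l.foldl gfcStep (s, pv) =
      (s ++ (if l.isEmpty then "" else "\n/* " ++ gfcTitle r ++ " */\n" ++
        PySem.Str.join "" (l.filterMap (fun p => gfcFrag p.1 p.2))),
       if l.isEmpty then pv else r) := by
  cases l with
  | nil => simp
  | cons p t =>
    have hp : gfcRank p.1 = r := h p (by simp)
    rw [List.foldl_cons]
    have hne : r ≠ pv := fun hh => hpv hh.symm
    have hstep : gfcStep (s, pv) p =
        (if (PySem.Dict.mk p.2).contains "raw_css" then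
          (s ++ ("\n/* " ++ gfcTitle r ++ " */\n")) ++ ("/* " ++ p.1 ++ " */\n") ++ ((PySem.Dict.mk p.2).getD "raw_css" "" ++ "\n\n")
        else s ++ ("\n/* " ++ gfcTitle r ++ " */\n"), r) := by
      simp [gfcStep, hp, hne]
    rw [hstep]
    by_cases hc : (PySem.Dict.mk p.2).contains "raw_css" = true
    · rw [if_pos hc, gfc_scan_run t r (fun q hq => h q (by simp [hq]))]
      simp only [List.isEmpty_cons, List.filterMap_cons, gfcFrag, if_pos hc]
      rw [join_empty_cons]
      simp [String.append_assoc]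
    · rw [if_neg (by simp [hc]), gfc_scan_run t r (fun q hq => h q (by simp [hq]))]
      simp only [List.isEmpty_cons, List.filterMap_cons, gfcFrag,
        if_neg (by simp [hc] : ¬ ((PySem.Dict.mk p.2).contains "raw_css" = true))]
      simp [String.append_assoc]

-- ===== VERDICT =====
theorem generate_final_css_spec : Claim_equal_generate_final_css := by
  intro css_variables theme_name _
  unfold Spec_generate_final_css generate_final_css generate_final_css_alt
  by_cases he : css_variables.isEmpty
  · simp [he]
    decide
  · have he' : css_variables.isEmpty = false := by simpa using he
    simp only [he', Bool.false_eq_true, if_false]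
    rw [sorted_partition]
    set wv := css_variables.filter (fun p => PySem.Str.startswith p.1 "widget-") with hwv
    set gv := css_variables.filter (fun p => PySem.Str.startswith p.1 "group-") with hgv
    set ov := css_variables.filter (fun p => !(PySem.Str.startswith p.1 "widget-" || PySem.Str.startswith p.1 "group-")) with hov
    have hw0 : ∀ p ∈ wv, gfcRank p.1 = 0 := by
      intro p hp
      exact rank_widget p.1 (by simpa using (List.mem_filter.mp hp).2)
    have hg1 : ∀ p ∈ gv, gfcRank p.1 = 1 := by
      intro p hp
      have hg : PySem.Str.startswith p.1 "group-" = true := by simpa using (List.mem_filter.mp hp).2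
      have hw : PySem.Str.startswith p.1 "widget-" = false := by
        by_contra hh
        simp only [Bool.not_eq_false] at hh
        rw [not_widget_and_group p.1 hh] at hg
        exact Bool.false_ne_true hg
      exact rank_group p.1 hw hg
    have ho2 : ∀ p ∈ ov, gfcRank p.1 = 2 := by
      intro p hp
      have hb := (List.mem_filter.mp hp).2
      simp only [Bool.not_eq_true', Bool.or_eq_false_iff] at hb
      exact rank_other p.1 hb.1 hb.2
    rw [List.foldl_append, List.foldl_append]
    rw [gfc_scan_section wv 0 hw0 _ (-1) (by omega)]
    rw [gfc_scan_section gv 1 hg1 _ _ (by split <;> omega)]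
    rw [gfc_scan_section ov 2 ho2 _ _ (by split <;> (try split) <;> omega)]
    simp only [foldl_section]
    by_cases h1 : wv.isEmpty <;> by_cases h2 : gv.isEmpty <;> by_cases h3 : ov.isEmpty <;>
      simp [h1, h2, h3, gfcTitle, ← String.append_assoc]
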